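-- pv_equiv track=rewrite | github.com/blobotic/awap-game-engine-2026-public | bots/utils/orders.py | estimate_order_completion_time
-- ===== SOURCE A (Python) =====
-- from typing import List, Dict, Any, Callable, Optional
--
-- INGREDIENT_PROPS = {
--     'EGG': {'can_chop': False, 'can_cook': True},
--     'ONIONS': {'can_chop': True, 'can_cook': False},
--     'MEAT': {'can_chop': True, 'can_cook': True},
--     'NOODLES': {'can_chop': False, 'can_cook': False},
--     'SAUCE': {'can_chop': False, 'can_cook': False},
-- }
--
-- def estimate_order_completion_time(order: Dict[str, Any]) -> int:
--     """
--     Estimate minimum turns needed to complete an order.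
--     This is a rough estimate based on:
--     - Travel time (approximate)
--     - Cooking time (20 turns if any cookable)
--     - Action time (chop, place, etc.)
--     """
--     base_time = 10  # Base travel and actions
--
--     has_cookable = False
--     has_choppable = False
--
--     for ingredient in order['required']:
--         props = INGREDIENT_PROPS.get(ingredient, {})
--         if props.get('can_cook', False):
--             has_cookable = True
--         if props.get('can_chop', False):
--             has_choppable = True
--
--     time = base_time
--     if has_cookable:
--         time += 20  # Cooking time
--     if has_choppable:
--         time += 5  # Chopping overhead
--
--     # Add time per ingredient
--     time += len(order['required']) * 3
--
--     return time
-- ===== SOURCE B (Python) =====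
-- INGREDIENT_PROPS = {
--     'EGG': {'can_chop': False, 'can_cook': True},
--     'ONIONS': {'can_chop': True, 'can_cook': False},
--     'MEAT': {'can_chop': True, 'can_cook': True},
--     'NOODLES': {'can_chop': False, 'can_cook': False},
--     'SAUCE': {'can_chop': False, 'can_cook': False},
-- }
--
-- COOKABLE = {name for name, p in INGREDIENT_PROPS.items() if p['can_cook']}
-- CHOPPABLE = {name for name, p in INGREDIENT_PROPS.items() if p['can_chop']}
--
-- def estimate_order_completion_time(order):
--     required = order['required']
--     req_set = set(required)
--     return (10
--             + (20 if req_set & COOKABLE else 0)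
--             + (5 if req_set & CHOPPABLE else 0)
--             + len(required) * 3)
-- ===== Notes on version B (the rewrite author's own statement) =====
-- stated objective: idiomatic
-- what changed: Replaces the per-ingredient flag loop with repeated nested dict lookups by two precomputed name sets (COOKABLE/CHOPPABLE) and a single set-intersection test on the deduplicated requirements.
import Mathlib
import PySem

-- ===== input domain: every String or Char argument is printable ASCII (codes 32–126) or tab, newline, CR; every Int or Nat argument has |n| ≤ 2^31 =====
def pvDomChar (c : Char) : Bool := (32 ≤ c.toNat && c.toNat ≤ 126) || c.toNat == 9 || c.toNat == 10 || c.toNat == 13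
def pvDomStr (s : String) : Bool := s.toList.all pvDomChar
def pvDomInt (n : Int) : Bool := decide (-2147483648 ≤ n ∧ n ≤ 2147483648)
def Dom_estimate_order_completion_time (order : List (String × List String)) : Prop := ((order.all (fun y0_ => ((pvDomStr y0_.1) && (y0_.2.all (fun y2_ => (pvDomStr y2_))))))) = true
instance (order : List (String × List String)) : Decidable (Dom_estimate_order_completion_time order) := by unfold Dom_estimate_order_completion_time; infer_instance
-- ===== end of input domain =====

-- B replaces A's per-ingredient flag loop by two precomputed name sets and set intersection (alternative decomposition, same cost).

-- ===== PORT A =====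
-- INGREDIENT_PROPS, transliterated as a PySem.Dict of PySem.Dicts.
def INGREDIENT_PROPS : PySem.Dict String (PySem.Dict String Bool) :=
  PySem.Dict.mk
    [ ("EGG",     PySem.Dict.mk [("can_chop", false), ("can_cook", true)]),
      ("ONIONS",  PySem.Dict.mk [("can_chop", true),  ("can_cook", false)]),
      ("MEAT",    PySem.Dict.mk [("can_chop", true),  ("can_cook", true)]),
      ("NOODLES", PySem.Dict.mk [("can_chop", false), ("can_cook", false)]),
      ("SAUCE",   PySem.Dict.mk [("can_chop", false), ("can_cook", false)]) ]

def estimate_order_completion_time (order : List (String × List String)) : Int :=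
  let required := ((PySem.Dict.mk order).get? "required").getD []   -- order['required']; Pre_ excludes the KeyError
  let flags := required.foldl
    (fun (f : Bool × Bool) ingredient =>
      let props := (INGREDIENT_PROPS.get? ingredient).getD (PySem.Dict.mk [])
      let hasCook := if props.getD "can_cook" false then true else f.1
      let hasChop := if props.getD "can_chop" false then true else f.2
      (hasCook, hasChop))
    (false, false)
  let time : Int := 10
  let time := if flags.1 then time + 20 else time
  let time := if flags.2 then time + 5 else time
  time + (required.length : Int) * 3

-- ===== PORT B =====
-- Source B builds its sets from the same module constant INGREDIENT_PROPS.
def COOKABLE : PySem.Set String :=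
  PySem.Set.ofList ((INGREDIENT_PROPS.items.filter (fun p => p.2.getD "can_cook" false)).map (·.1))
def CHOPPABLE : PySem.Set String :=
  PySem.Set.ofList ((INGREDIENT_PROPS.items.filter (fun p => p.2.getD "can_chop" false)).map (·.1))

def estimate_order_completion_time_alt (order : List (String × List String)) : Int :=
  let required := ((PySem.Dict.mk order).get? "required").getD []   -- order['required']; Pre_ excludes the KeyError
  let reqSet := PySem.Set.ofList required
  (10 : Int)
    + (if (PySem.Set.inter reqSet COOKABLE) ≠ [] then 20 else 0)
    + (if (PySem.Set.inter reqSet CHOPPABLE) ≠ [] then 5 else 0)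
    + (required.length : Int) * 3

-- ===== PRECONDITION & SPEC =====
-- Pre_ excludes exactly the orders without a 'required' key, on which A raises KeyError.
def Pre_estimate_order_completion_time (order : List (String × List String)) : Prop :=
  ((PySem.Dict.mk order).get? "required").isSome = true
instance (order : List (String × List String)) : Decidable (Pre_estimate_order_completion_time order) := by unfold Pre_estimate_order_completion_time; infer_instance

def pvWitness_estimate_order_completion_time : (List (String × List String)) :=
  [("required", ["EGG", "ONIONS", "EGG"])]

def Spec_estimate_order_completion_time (order : List (String × List String)) (out : Int) : Prop := out = estimate_order_completion_time_alt order
instance (order : List (String × List String)) (out : Int) : Decidable (Spec_estimate_order_completion_time order out) := by unfold Spec_estimate_order_completion_time; infer_instance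

-- ===== CLAIM (what is proved, stated in full; the proofs are below) =====
def Claim_equal_estimate_order_completion_time : Prop := ∀ (order : List (String × List String)), Dom_estimate_order_completion_time order → Pre_estimate_order_completion_time order → Spec_estimate_order_completion_time order (estimate_order_completion_time order)

-- ===== LEMMAS AND PROOFS =====

-- A's per-ingredient cook test, as a function.
def cookA (ing : String) : Bool :=
  ((INGREDIENT_PROPS.get? ing).getD (PySem.Dict.mk [])).getD "can_cook" false
def chopA (ing : String) : Bool :=
  ((INGREDIENT_PROPS.get? ing).getD (PySem.Dict.mk [])).getD "can_chop" false

lemma cookA_eq (ing : String) : cookA ing = decide (ing ∈ (COOKABLE : List String)) := by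
  by_cases h1 : ing = "EGG"; · subst h1; decide
  by_cases h2 : ing = "ONIONS"; · subst h2; decide
  by_cases h3 : ing = "MEAT"; · subst h3; decide
  by_cases h4 : ing = "NOODLES"; · subst h4; decide
  by_cases h5 : ing = "SAUCE"; · subst h5; decide
  have g1 : ("EGG" == ing) = false := beq_eq_false_iff_ne.mpr (Ne.symm h1)
  have g2 : ("ONIONS" == ing) = false := beq_eq_false_iff_ne.mpr (Ne.symm h2)
  have g3 : ("MEAT" == ing) = false := beq_eq_false_iff_ne.mpr (Ne.symm h3)
  have g4 : ("NOODLES" == ing) = false := beq_eq_false_iff_ne.mpr (Ne.symm h4)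
  have g5 : ("SAUCE" == ing) = false := beq_eq_false_iff_ne.mpr (Ne.symm h5)
  simp [cookA, COOKABLE, INGREDIENT_PROPS, PySem.Dict.get?, PySem.Dict.getD,
    PySem.Set.ofList, List.find?, g1, g2, g3, g4, g5, h1, h3]

lemma chopA_eq (ing : String) : chopA ing = decide (ing ∈ (CHOPPABLE : List String)) := by
  by_cases h1 : ing = "EGG"; · subst h1; decide
  by_cases h2 : ing = "ONIONS"; · subst h2; decide
  by_cases h3 : ing = "MEAT"; · subst h3; decide
  by_cases h4 : ing = "NOODLES"; · subst h4; decide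
  by_cases h5 : ing = "SAUCE"; · subst h5; decide
  have g1 : ("EGG" == ing) = false := beq_eq_false_iff_ne.mpr (Ne.symm h1)
  have g2 : ("ONIONS" == ing) = false := beq_eq_false_iff_ne.mpr (Ne.symm h2)
  have g3 : ("MEAT" == ing) = false := beq_eq_false_iff_ne.mpr (Ne.symm h3)
  have g4 : ("NOODLES" == ing) = false := beq_eq_false_iff_ne.mpr (Ne.symm h4)
  have g5 : ("SAUCE" == ing) = false := beq_eq_false_iff_ne.mpr (Ne.symm h5)
  simp [chopA, CHOPPABLE, INGREDIENT_PROPS, PySem.Dict.get?, PySem.Dict.getD,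
    PySem.Set.ofList, List.find?, g1, g2, g3, g4, g5, h2, h3]

-- A's flag fold computes the two 'any's.
lemma foldl_flags (req : List String) (a b : Bool) :
    req.foldl
      (fun (f : Bool × Bool) ingredient =>
        let props := (INGREDIENT_PROPS.get? ingredient).getD (PySem.Dict.mk [])
        ((if props.getD "can_cook" false then true else f.1),
         (if props.getD "can_chop" false then true else f.2)))
      (a, b)
    = (a || req.any cookA, b || req.any chopA) := by
  induction req generalizing a b with
  | nil => simp
  | cons x xs ih =>
    simp only [List.foldl_cons, List.any_cons]
    rw [ih]
    rw [show ((INGREDIENT_PROPS.get? x).getD (PySem.Dict.mk [])).getD "can_cook" false = cookA x from rfl]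
    rw [show ((INGREDIENT_PROPS.get? x).getD (PySem.Dict.mk [])).getD "can_chop" false = chopA x from rfl]
    cases cookA x <;> cases chopA x <;> cases a <;> cases b <;> simp

-- B's intersection-nonempty test is the same 'any'.
lemma inter_ne_iff_any (req : List String) (s : PySem.Set String) :
    ((PySem.Set.inter (PySem.Set.ofList req) s) ≠ [] ↔ req.any (fun x => decide (x ∈ s)) = true) := by
  rw [← List.isEmpty_eq_false_iff, List.isEmpty_eq_false_iff_exists_mem]
  simp [PySem.Set.mem_inter, PySem.Set.mem_ofList]

-- ===== VERDICT (by name: the statement is the Claim_ definition above) =====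
theorem estimate_order_completion_time_spec : Claim_equal_estimate_order_completion_time := by
  intro order _ _
  unfold Spec_estimate_order_completion_time
  unfold estimate_order_completion_time estimate_order_completion_time_alt
  simp only []
  rw [foldl_flags]
  set req := ((PySem.Dict.mk order).get? "required").getD []
  have hc : (req.any cookA) = (req.any (fun x => decide (x ∈ (COOKABLE : List String)))) :=
    congrArg req.any (funext cookA_eq)
  have hh : (req.any chopA) = (req.any (fun x => decide (x ∈ (CHOPPABLE : List String)))) :=
    congrArg req.any (funext chopA_eq)
  have e1 : (PySem.Set.inter (PySem.Set.ofList req) COOKABLE ≠ []) ↔ req.any cookA = true := by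
    rw [inter_ne_iff_any, hc]
  have e2 : (PySem.Set.inter (PySem.Set.ofList req) CHOPPABLE ≠ []) ↔ req.any chopA = true := by
    rw [inter_ne_iff_any, hh]
  by_cases hA : req.any cookA = true <;> by_cases hB : req.any chopA = true <;>
    simp [hA, hB, e1, e2]
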